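-- pv_equiv track=rewrite | github.com/NathanWang2/magiclink | app.py | _getTotalFluctuation
-- ===== SOURCE A (Python) =====
-- def _getTotalFluctuation(station_temps):
--
--     total_fluctuation = 0
--     last_temp = None
--
--     for temperature in station_temps:
--
--         if last_temp is None:
--             last_temp = temperature
--         else:
--             total_fluctuation += abs(last_temp - temperature)
--             last_temp = temperature
--
--     return total_fluctuation
-- ===== SOURCE B (Python) =====
-- def _getTotalFluctuation(station_temps):
--     temps = list(station_temps)
--
--     def rec(lo, hi):
--         # total fluctuation within temps[lo:hi], by divide and conquer:
--         # split at mid, add the one crossing difference |temps[mid-1]-temps[mid]|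
--         if hi - lo < 2:
--             return 0
--         mid = (lo + hi) // 2
--         return rec(lo, mid) + abs(temps[mid - 1] - temps[mid]) + rec(mid, hi)
--
--     return rec(0, len(temps))
-- ===== Notes on version B (the rewrite author's own statement) =====
-- stated objective: alternative
-- what changed: Replaces A's sentinel (last_temp/None) accumulator loop by a divide-and-conquer recursion: split the index interval at its midpoint, recurse on both halves, and add the single crossing difference |temps[mid-1]-temps[mid]|; correct because the consecutive-difference sum is interval-additive.
import Mathlib
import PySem

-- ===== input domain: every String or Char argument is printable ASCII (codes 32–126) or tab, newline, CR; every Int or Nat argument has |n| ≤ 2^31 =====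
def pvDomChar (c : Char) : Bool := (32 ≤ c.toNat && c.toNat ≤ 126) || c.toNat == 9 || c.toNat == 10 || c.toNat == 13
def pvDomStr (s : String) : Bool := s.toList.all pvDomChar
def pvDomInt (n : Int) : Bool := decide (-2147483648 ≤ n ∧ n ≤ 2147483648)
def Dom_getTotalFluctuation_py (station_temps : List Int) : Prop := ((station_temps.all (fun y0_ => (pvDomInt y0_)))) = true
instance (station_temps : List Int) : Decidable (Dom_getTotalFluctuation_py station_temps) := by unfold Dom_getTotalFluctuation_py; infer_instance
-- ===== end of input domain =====

-- B replaces A's sentinel (last_temp = None) accumulator loop by a divide-and-conquer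
-- recursion on index intervals (halve, recurse, add the one crossing difference).

-- ===== PORT A =====
-- literal port of A's loop: state = (total_fluctuation, last_temp : Option Int)
def getTotalFluctuation_py (station_temps : List Int) : Int :=
  (station_temps.foldl
    (fun (st : Int × Option Int) temperature =>
      match st.2 with
      | none => (st.1, some temperature)
      | some last_temp => (st.1 + |last_temp - temperature|, some temperature))
    (0, none)).1

-- ===== PORT B =====
-- port of B's inner `rec(lo, hi)`; temps[i] is always in range when B reads it
-- (lo < mid < hi ≤ len), so `getD _ 0` is exact for Python's temps[mid-1]/temps[mid]
def pvRecB (temps : List Int) (lo hi : Nat) : Int :=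
  if hi - lo < 2 then 0
  else
    let mid := (lo + hi) / 2
    pvRecB temps lo mid + |temps.getD (mid - 1) 0 - temps.getD mid 0| + pvRecB temps mid hi
termination_by hi - lo
decreasing_by all_goals omega

def getTotalFluctuation_py_alt (station_temps : List Int) : Int :=
  pvRecB station_temps 0 station_temps.length

-- ===== PRECONDITION & SPEC =====
def Spec_getTotalFluctuation_py (station_temps : List Int) (out : Int) : Prop := out = getTotalFluctuation_py_alt station_temps
instance (station_temps : List Int) (out : Int) : Decidable (Spec_getTotalFluctuation_py station_temps out) := by unfold Spec_getTotalFluctuation_py; infer_instance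

-- ===== CLAIM (what is proved, stated in full; the proofs are below) =====
def Claim_equal_getTotalFluctuation_py : Prop := ∀ (station_temps : List Int), Dom_getTotalFluctuation_py station_temps → Spec_getTotalFluctuation_py station_temps (getTotalFluctuation_py station_temps)

-- ===== LEMMAS AND PROOFS =====
-- reference value: sum of consecutive differences over the index interval (lo, hi)
def pvS (temps : List Int) (lo hi : Nat) : Int :=
  ∑ i ∈ Finset.Ico (lo + 1) hi, |temps.getD (i - 1) 0 - temps.getD i 0|

-- B's recursion computes pvS on every interval (getD makes both total, no bounds needed)
theorem pvRecB_eq_S (temps : List Int) (lo hi : Nat) :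
    pvRecB temps lo hi = pvS temps lo hi := by
  fun_induction pvRecB temps lo hi with
  | case1 lo hi h =>
    have : Finset.Ico (lo + 1) hi = ∅ := Finset.Ico_eq_empty (by omega)
    simp [pvS, this]
  | case2 lo hi h mid ih1 ih2 =>
    rw [ih1, ih2]
    unfold pvS
    rw [← Finset.sum_Ico_consecutive _ (by omega : lo + 1 ≤ (lo + hi) / 2) (by omega : (lo + hi) / 2 ≤ hi)]
    rw [Finset.sum_eq_sum_Ico_succ_bot (by omega : (lo + hi) / 2 < hi)]
    ring

-- A's fold invariant: once last_temp = x, the fold adds the pairwise sum of x :: l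
theorem pvFold_some (l : List Int) (acc x : Int) :
    (l.foldl
      (fun (st : Int × Option Int) temperature =>
        match st.2 with
        | none => (st.1, some temperature)
        | some last_temp => (st.1 + |last_temp - temperature|, some temperature))
      (acc, some x)).1
    = acc + ∑ i ∈ Finset.range l.length, |(x :: l).getD i 0 - (x :: l).getD (i + 1) 0| := by
  induction l generalizing acc x with
  | nil => simp
  | cons y t ih =>
    simp only [List.foldl_cons, List.length_cons]
    rw [ih, Finset.sum_range_succ']
    simp only [List.getD_cons_succ, List.getD_cons_zero]
    ring

-- the range-indexed pairwise sum over x :: t is pvS (x :: t) 0 (t.length + 1)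
theorem pvS_cons (x : Int) (t : List Int) :
    pvS (x :: t) 0 (t.length + 1)
      = ∑ i ∈ Finset.range t.length, |(x :: t).getD i 0 - (x :: t).getD (i + 1) 0| := by
  unfold pvS
  rw [Finset.sum_Ico_eq_sum_range]
  simp only [Nat.add_sub_cancel]
  refine Finset.sum_congr rfl fun i _ => ?_
  rw [Nat.add_comm 1 i]
  simp

-- ===== VERDICT (by name: the statement is the Claim_ definition above) =====
theorem getTotalFluctuation_py_spec : Claim_equal_getTotalFluctuation_py := by
  intro l _
  unfold Spec_getTotalFluctuation_py getTotalFluctuation_py getTotalFluctuation_py_alt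
  rw [pvRecB_eq_S]
  cases l with
  | nil => simp [pvS]
  | cons x t =>
    simp only [List.foldl_cons, List.length_cons]
    rw [pvFold_some, pvS_cons]
    ring
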